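-- pv_equiv track=rewrite | github.com/dinosaurz/edX | Midterm/midterm.py | McNuggets
-- ===== SOURCE A (Python) =====
-- def McNuggets(n):
--     # Create the list of falses
--     trues, falses = [0], []
--     i, successes = 1, 0
--
--     while True:
--         if i - 6 in trues or i - 9 in trues or i - 20 in trues:
--             trues.append(i)
--             successes += 1
--             if successes == 6:
--                 break
--         else:
--             falses.append(i)
--             successes = 0
--         i += 1
--
--     if n in falses:
--         return False
--     return True
-- ===== SOURCE B (Python) =====
-- def McNuggets(n):
--     # Brute-force: enumerate every 6a+9b+20c up to the Frobenius bound and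
--     # remove it from the candidate non-McNugget set; n is a McNugget number
--     # iff it is not among the survivors.
--     non = set(range(1, 44))
--     for a in range(8):
--         for b in range(5):
--             for c in range(3):
--                 non.discard(6 * a + 9 * b + 20 * c)
--     return n not in non
-- ===== Notes on version B (the rewrite author's own statement) =====
-- stated objective: alternative
-- what changed: Replaces A's incremental reachability loop (grow 'trues' until 6 consecutive successes, collecting failures) with a direct triple-loop enumeration of all sums 6a+9b+20c that prunes a fixed candidate set range(1,44).
import Mathlib
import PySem

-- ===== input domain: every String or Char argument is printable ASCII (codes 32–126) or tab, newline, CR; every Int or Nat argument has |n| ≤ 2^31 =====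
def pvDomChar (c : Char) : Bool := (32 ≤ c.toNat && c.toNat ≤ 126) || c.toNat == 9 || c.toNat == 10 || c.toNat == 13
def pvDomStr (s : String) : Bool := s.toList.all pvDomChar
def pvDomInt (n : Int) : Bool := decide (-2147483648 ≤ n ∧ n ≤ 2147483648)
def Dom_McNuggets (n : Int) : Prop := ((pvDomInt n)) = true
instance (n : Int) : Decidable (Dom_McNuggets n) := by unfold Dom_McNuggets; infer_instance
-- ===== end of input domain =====

-- B replaces A's incremental reachability loop with a fixed triple-loop enumeration
-- pruning the candidate set range(1,44); equal cost, different algorithm.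

-- ===== PORT A =====
-- A's 'while True' loop; fuel only makes the recursion total (the loop breaks at i = 49,
-- so fuel 100 is never exhausted on the actual run).
def mcLoopA : Nat → List Int → List Int → Int → Int → List Int
  | 0, _, falses, _, _ => falses
  | fuel + 1, trues, falses, i, successes =>
    if trues.contains (i - 6) || trues.contains (i - 9) || trues.contains (i - 20) then
      let trues' := trues ++ [i]
      let successes' := successes + 1
      if successes' == 6 then falses
      else mcLoopA fuel trues' falses (i + 1) successes'
    else
      mcLoopA fuel trues (falses ++ [i]) (i + 1) 0

def McNuggets (n : Int) : Bool :=
  if (mcLoopA 100 [0] [] 1 0).contains n then false else true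

-- ===== PORT B =====
-- the pruned candidate set (independent of n; Python builds it before the membership test)
def mcNonB : PySem.Set Int :=
  (PySem.List.pyRange 0 8 1).foldl (fun s a =>
    (PySem.List.pyRange 0 5 1).foldl (fun s b =>
      (PySem.List.pyRange 0 3 1).foldl (fun s c =>
        PySem.Set.discard s (6 * a + 9 * b + 20 * c)) s) s)
    (PySem.Set.ofList (PySem.List.pyRange 1 44 1))

def McNuggets_alt (n : Int) : Bool := !(PySem.Set.contains mcNonB n)

-- ===== PRECONDITION & SPEC =====
def Spec_McNuggets (n : Int) (out : Bool) : Prop := out = McNuggets_alt n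
instance (n : Int) (out : Bool) : Decidable (Spec_McNuggets n out) := by unfold Spec_McNuggets; infer_instance

-- ===== CLAIM (what is proved, stated in full; the proofs are below) =====
def Claim_equal_McNuggets : Prop := ∀ (n : Int), Dom_McNuggets n → Spec_McNuggets n (McNuggets n)

-- ===== LEMMAS AND PROOFS =====
-- Both ports reduce to membership in a concrete finite list; the two literal lists
-- contain the same 22 non-representable numbers.
def pvFalsesA : List Int := [1, 2, 3, 4, 5, 7, 8, 10, 11, 13, 14, 16, 17, 19, 22, 23, 25, 28, 31, 34, 37, 43]

set_option maxRecDepth 40000 in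
theorem mcLoopA_eval : mcLoopA 100 [0] [] 1 0 = pvFalsesA := by decide

set_option maxRecDepth 200000 in
theorem nonB_eval : mcNonB = pvFalsesA := by decide

theorem McNuggets_eq (n : Int) : McNuggets n = !(pvFalsesA.contains n) := by
  unfold McNuggets
  rw [mcLoopA_eval]
  cases h : pvFalsesA.contains n <;> simp_all [pvFalsesA]

theorem McNuggets_alt_eq (n : Int) : McNuggets_alt n = !(pvFalsesA.contains n) := by
  unfold McNuggets_alt
  rw [nonB_eval]
  rfl

-- ===== VERDICT (by name: the statement is the Claim_ definition above) =====
theorem McNuggets_spec : Claim_equal_McNuggets := by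
  intro n _
  unfold Spec_McNuggets
  rw [McNuggets_eq, McNuggets_alt_eq]
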